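-- pv_equiv track=rewrite | github.com/kraini-X/Leetcode | 4292-compare-sums-of-bitonic-parts/compare-sums-of-bitonic-parts.py | compareBitonicSums
-- ===== SOURCE A (Python) =====
-- def compareBitonicSums(nums: list[int]) -> int:
--     maxm=max(nums)
--     n=len(nums)
--     peak=0
--     for i in range(n):
--         if nums[i]==maxm:
--             peak=i
--     prefix=[0]*n
--     suffix=[0]*n
--     prefix[0]=nums[0]
--     suffix[n-1]=nums[n-1]
--
--     for i in range(1,n):
--         prefix[i]=prefix[i-1]+nums[i]
--
--     for i in range(n-2,-1,-1):
--         suffix[i]=suffix[i+1]+nums[i]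
--
--     asc=prefix[peak]
--     desc=suffix[peak]
--
--     if asc>desc:
--         return 0
--     elif asc<desc:
--         return 1
--     else:
--         return -1
-- ===== SOURCE B (Python) =====
-- def compareBitonicSums(nums: list[int]) -> int:
--     m = max(nums)
--     peak = len(nums) - 1 - nums[::-1].index(m)
--     asc = sum(nums[:peak + 1])
--     desc = sum(nums[peak:])
--     if asc > desc:
--         return 0
--     if asc < desc:
--         return 1
--     return -1
-- ===== Notes on version B (the rewrite author's own statement) =====
-- stated objective: simpler
-- what changed: Replaces the last-max index loop plus the two maintained prefix/suffix sum tables by a direct computation: peak via reversed-list index of the max, then two slice sums nums[:peak+1] and nums[peak:].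
import Mathlib
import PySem

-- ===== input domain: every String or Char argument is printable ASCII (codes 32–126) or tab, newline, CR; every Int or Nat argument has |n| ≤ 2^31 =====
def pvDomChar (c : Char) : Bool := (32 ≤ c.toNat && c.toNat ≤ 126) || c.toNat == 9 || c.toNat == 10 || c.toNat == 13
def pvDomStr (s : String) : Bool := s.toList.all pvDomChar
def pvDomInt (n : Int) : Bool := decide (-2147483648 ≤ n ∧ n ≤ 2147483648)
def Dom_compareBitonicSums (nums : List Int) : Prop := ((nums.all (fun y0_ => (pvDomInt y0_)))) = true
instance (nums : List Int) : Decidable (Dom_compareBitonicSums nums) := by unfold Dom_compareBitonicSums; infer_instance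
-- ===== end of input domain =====

-- B computes the peak and the two partial sums directly (reversed index + slice sums)
-- instead of A's maintained prefix/suffix tables; equal return value on all non-empty lists.

-- ===== PORT A =====
def compareBitonicSums (nums : List Int) : Int :=
  match PySem.List.max? nums (fun y => y) with
  | none => 0  -- unreachable: max([]) raises ValueError, excluded by Pre_
  | some maxm =>
    let n : Int := PySem.List.len nums
    let peak : Int := (PySem.List.pyRange 0 n 1).foldl
      (fun peak i => if PySem.List.pyGetD nums i 0 = maxm then i else peak) 0
    let prefix0 : List Int := List.replicate nums.length 0
    let suffix0 : List Int := List.replicate nums.length 0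
    let prefix1 := PySem.List.pySetD prefix0 0 (PySem.List.pyGetD nums 0 0)
    let suffix1 := PySem.List.pySetD suffix0 (n - 1) (PySem.List.pyGetD nums (n - 1) 0)
    let prefix2 := (PySem.List.pyRange 1 n 1).foldl
      (fun p i => PySem.List.pySetD p i (PySem.List.pyGetD p (i - 1) 0 + PySem.List.pyGetD nums i 0)) prefix1
    let suffix2 := (PySem.List.pyRange (n - 2) (-1) (-1)).foldl
      (fun s i => PySem.List.pySetD s i (PySem.List.pyGetD s (i + 1) 0 + PySem.List.pyGetD nums i 0)) suffix1
    let asc := PySem.List.pyGetD prefix2 peak 0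
    let desc := PySem.List.pyGetD suffix2 peak 0
    if asc > desc then 0 else if asc < desc then 1 else -1

-- ===== PORT B =====
def compareBitonicSums_alt (nums : List Int) : Int :=
  match PySem.List.max? nums (fun y => y) with
  | none => 0  -- unreachable: max([]) raises ValueError, excluded by Pre_
  | some m =>
    -- nums[::-1] is reverse (PySem.List.slice?_none_none_neg_one); .index never raises since m ∈ nums
    let peak : Int := PySem.List.len nums - 1 - ((PySem.List.index? nums.reverse m).getD 0 : Int)
    let asc := (PySem.List.slice nums none (some (peak + 1))).sum
    let desc := (PySem.List.slice nums (some peak) none).sum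
    if asc > desc then 0 else if asc < desc then 1 else -1

-- ===== PRECONDITION & SPEC =====
-- Pre_ excludes only the empty list, on which Python's max(nums) raises ValueError (in A and in B).
def Pre_compareBitonicSums (nums : List Int) : Prop := nums ≠ []
instance (nums : List Int) : Decidable (Pre_compareBitonicSums nums) := by unfold Pre_compareBitonicSums; infer_instance
def pvWitness_compareBitonicSums : List Int := [1, 3, 2]

def Spec_compareBitonicSums (nums : List Int) (out : Int) : Prop := out = compareBitonicSums_alt nums
instance (nums : List Int) (out : Int) : Decidable (Spec_compareBitonicSums nums out) := by unfold Spec_compareBitonicSums; infer_instance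

-- ===== CLAIM (what is proved, stated in full; the proofs are below) =====
def Claim_equal_compareBitonicSums : Prop := ∀ (nums : List Int), Dom_compareBitonicSums nums → Pre_compareBitonicSums nums → Spec_compareBitonicSums nums (compareBitonicSums nums)

-- ===== LEMMAS AND PROOFS =====


-- helper: fact specific to these ports — getD through an in-bounds index of xs ++ ys
lemma pvGetD_append_left (xs ys : List Int) (i : Int) (h0 : 0 ≤ i) (h1 : i < (xs.length : Int)) :
    PySem.List.pyGetD (xs ++ ys) i 0 = PySem.List.pyGetD xs i 0 := by
  rw [PySem.List.pyGetD_eq_getElem _ _ h0 (by simp; omega),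
      PySem.List.pyGetD_eq_getElem _ _ h0 (by simpa using h1)]
  exact List.getElem_append_left (by omega)

-- A's last-max-index loop equals B's reversed-index formula
lemma pvPeak_foldl_eq (nums : List Int) (m : Int) (hm : m ∈ nums) :
    (PySem.List.pyRange 0 (nums.length : Int) 1).foldl
      (fun peak i => if PySem.List.pyGetD nums i 0 = m then i else peak) 0
    = (nums.length : Int) - 1 - ((PySem.List.index? nums.reverse m).getD 0 : Int) := by
  induction nums using List.reverseRecOn with
  | nil => simp at hm
  | append_singleton xs x ih =>
    have hlen : (((xs ++ [x]).length : Nat) : Int) = (xs.length : Int) + 1 := by simp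
    rw [hlen, PySem.List.pyRange_one_succ_right (by positivity), List.foldl_append]
    have hcongr : (PySem.List.pyRange 0 (xs.length : Int) 1).foldl
        (fun peak i => if PySem.List.pyGetD (xs ++ [x]) i 0 = m then i else peak) 0
      = (PySem.List.pyRange 0 (xs.length : Int) 1).foldl
        (fun peak i => if PySem.List.pyGetD xs i 0 = m then i else peak) 0 := by
      apply PySem.List.foldl_congr_mem
      intro acc i hi
      rw [PySem.List.mem_pyRange_one] at hi
      rw [pvGetD_append_left xs [x] i hi.1 hi.2]
    rw [hcongr]
    have hx : PySem.List.pyGetD (xs ++ [x]) (xs.length : Int) 0 = x := by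
      rw [PySem.List.pyGetD_natCast]
      simp [List.getD]
    simp only [List.foldl_cons, List.foldl_nil, hx]
    have hrev : (xs ++ [x]).reverse = x :: xs.reverse := by simp
    rw [hrev]
    by_cases hxm : x = m
    · subst hxm
      rw [PySem.List.index?_cons_self]
      simp
    · have hmxs : m ∈ xs := by
        rcases List.mem_append.1 hm with h | h
        · exact h
        · simp at h; exact absurd h.symm hxm
      have hsome : (PySem.List.index? xs.reverse m).isSome := by
        rw [PySem.List.index?_isSome_iff]; simpa using hmxs
      obtain ⟨j, hj⟩ := Option.isSome_iff_exists.1 hsome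
      rw [if_neg hxm, ih hmxs, PySem.List.index?_cons_of_ne _ hxm, hj]
      simp only [Option.map_some, Option.getD_some]
      push_cast
      ring

lemma pvIdx_lt (nums : List Int) (m : Int) (hm : m ∈ nums) :
    (PySem.List.index? nums.reverse m).getD 0 < nums.length := by
  have hsome : (PySem.List.index? nums.reverse m).isSome := by
    rw [PySem.List.index?_isSome_iff]; simpa using hm
  obtain ⟨j, hj⟩ := Option.isSome_iff_exists.1 hsome
  obtain ⟨hk, -, -⟩ := PySem.List.getElem_of_index?_eq_some hj
  rw [hj]
  simp only [Option.getD_some]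
  simpa using hk

-- models of the two tables
def pvPsum (nums : List Int) (j : Nat) : Int := (nums.take (j+1)).sum
def pvSsum (nums : List Int) (j : Nat) : Int := (nums.drop j).sum
def pvPmodel (nums : List Int) (k : Nat) : List Int :=
  (List.range nums.length).map (fun j => if j ≤ k then pvPsum nums j else 0)
def pvSmodel (nums : List Int) (k : Nat) : List Int :=
  (List.range nums.length).map (fun j => if k ≤ j then pvSsum nums j else 0)

lemma pvPmodel_getD (nums : List Int) (k j : Nat) (hj : j < nums.length) :
    (pvPmodel nums k).getD j 0 = if j ≤ k then pvPsum nums j else 0 := by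
  simp [pvPmodel, List.getD, hj]

lemma pvSmodel_getD (nums : List Int) (k j : Nat) (hj : j < nums.length) :
    (pvSmodel nums k).getD j 0 = if k ≤ j then pvSsum nums j else 0 := by
  simp [pvSmodel, List.getD, hj]

lemma pvPmodel_zero (nums : List Int) (hne : nums ≠ []) :
    PySem.List.pySetD (List.replicate nums.length 0) 0 (PySem.List.pyGetD nums 0 0)
      = pvPmodel nums 0 := by
  have hn : 0 < nums.length := List.length_pos_iff.2 hne
  rw [PySem.List.pySetD_of_nonneg _ _ le_rfl, PySem.List.pyGetD_zero]
  simp only [Int.toNat_zero]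
  apply List.ext_getElem
  · simp [pvPmodel]
  · intro j h1 h2
    simp only [List.length_set, List.length_replicate] at h1
    simp only [pvPmodel, List.getElem_set, List.getElem_replicate, List.getElem_map,
      List.getElem_range]
    have hget : nums.getD 0 0 = pvPsum nums 0 := by
      cases nums with
      | nil => exact absurd rfl hne
      | cons a l => simp [pvPsum]
    by_cases hj0 : j = 0
    · subst hj0; simpa using hget
    · have h3 : ¬ (0 = j) := fun h => hj0 h.symm
      have h4 : ¬ (j ≤ 0) := by omega
      simp [h3, h4]

lemma pvPmodel_set (nums : List Int) (k : Nat) (h1 : 1 ≤ k) (h2 : k < nums.length) :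
    (pvPmodel nums (k-1)).set k (pvPsum nums k) = pvPmodel nums k := by
  apply List.ext_getElem
  · simp [pvPmodel]
  · intro j hj1 hj2
    simp only [pvPmodel, List.length_map, List.length_range, List.length_set] at hj1 hj2
    simp only [pvPmodel, List.getElem_set, List.getElem_map, List.getElem_range]
    by_cases hjk : j = k
    · subst hjk; simp
    · have h3 : ¬ (k = j) := fun h => hjk h.symm
      have hiff : (j ≤ k - 1) = (j ≤ k) := by
        apply propext; constructor <;> intro h <;> omega
      simp [h3, hiff]

lemma pvPrefix_loop (nums : List Int) :
    ∀ k : Nat, k ≤ nums.length →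
    (PySem.List.pyRange 1 (k : Int) 1).foldl
      (fun p i => PySem.List.pySetD p i
        (PySem.List.pyGetD p (i - 1) 0 + PySem.List.pyGetD nums i 0))
      (pvPmodel nums 0)
    = pvPmodel nums (k - 1) := by
  intro k
  induction k with
  | zero => intro _; rw [PySem.List.pyRange_one_eq_nil (by omega)]; rfl
  | succ j ih =>
    intro hk
    match j, ih with
    | 0, _ =>
      rw [PySem.List.pyRange_one_eq_nil (by omega)]; rfl
    | j + 1, ih =>
      have hcast : ((j + 1 + 1 : Nat) : Int) = ((j + 1 : Nat) : Int) + 1 := by push_cast; ring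
      rw [hcast, PySem.List.pyRange_one_succ_right (by push_cast; omega), List.foldl_append,
        ih (by omega)]
      simp only [List.foldl_cons, List.foldl_nil]
      have hsub : ((j + 1 : Nat) : Int) - 1 = (j : Int) := by push_cast; ring
      rw [hsub, PySem.List.pyGetD_natCast, PySem.List.pyGetD_natCast, PySem.List.pySetD_natCast]
      have hjlt : j < nums.length := by omega
      have hj1lt : j + 1 < nums.length := by omega
      rw [pvPmodel_getD nums (j + 1 - 1) j hjlt]
      have hval : (if j ≤ j + 1 - 1 then pvPsum nums j else 0) + nums.getD (j+1) 0
          = pvPsum nums (j+1) := by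
        rw [if_pos (by omega), List.getD_eq_getElem _ _ hj1lt]
        exact (List.sum_take_succ nums (j+1) hj1lt).symm
      rw [hval]
      have := pvPmodel_set nums (j+1) (by omega) hj1lt
      simpa using this

lemma pvSmodel_last (nums : List Int) (hne : nums ≠ []) :
    PySem.List.pySetD (List.replicate nums.length 0) ((nums.length : Int) - 1)
      (PySem.List.pyGetD nums ((nums.length : Int) - 1) 0)
      = pvSmodel nums (nums.length - 1) := by
  have hn : 0 < nums.length := List.length_pos_iff.2 hne
  have hcast : ((nums.length : Int) - 1) = ((nums.length - 1 : Nat) : Int) := by omega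
  rw [hcast, PySem.List.pySetD_natCast, PySem.List.pyGetD_natCast]
  apply List.ext_getElem
  · simp [pvSmodel]
  · intro j h1 h2
    simp only [List.length_set, List.length_replicate] at h1
    simp only [pvSmodel, List.getElem_set, List.getElem_replicate, List.getElem_map,
      List.getElem_range]
    have hget : nums.getD (nums.length - 1) 0 = pvSsum nums (nums.length - 1) := by
      rw [List.getD_eq_getElem _ _ (by omega), pvSsum,
        List.drop_eq_getElem_cons (by omega : nums.length - 1 < nums.length)]
      have h9 : nums.length - 1 + 1 = nums.length := by omega
      simp [h9]
    by_cases hj : j = nums.length - 1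
    · subst hj; simpa using hget
    · have h3 : ¬ (nums.length - 1 = j) := fun h => hj h.symm
      have h4 : ¬ (nums.length - 1 ≤ j) := by omega
      simp [h3, h4]

lemma pvSmodel_set (nums : List Int) (k : Nat) (h2 : k + 1 < nums.length) :
    (pvSmodel nums (k+1)).set k (pvSsum nums k) = pvSmodel nums k := by
  apply List.ext_getElem
  · simp [pvSmodel]
  · intro j hj1 hj2
    simp only [pvSmodel, List.length_map, List.length_range, List.length_set] at hj1 hj2
    simp only [pvSmodel, List.getElem_set, List.getElem_map, List.getElem_range]
    by_cases hjk : j = k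
    · subst hjk; simp
    · have h3 : ¬ (k = j) := fun h => hjk h.symm
      have hiff : (k + 1 ≤ j) = (k ≤ j) := by
        apply propext; constructor <;> intro h <;> omega
      simp [h3, hiff]

lemma pvSuffix_loop (nums : List Int) (hne : nums ≠ []) :
    ∀ k : Nat, k ≤ nums.length - 1 →
    (PySem.List.pyRange ((k : Int) - 1) (-1) (-1)).foldl
      (fun s i => PySem.List.pySetD s i
        (PySem.List.pyGetD s (i + 1) 0 + PySem.List.pyGetD nums i 0))
      (pvSmodel nums k)
    = pvSmodel nums 0 := by
  have hn : 0 < nums.length := List.length_pos_iff.2 hne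
  intro k
  induction k with
  | zero => intro _; rw [PySem.List.pyRange_neg_one_eq_nil (by omega)]; rfl
  | succ j ih =>
    intro hk
    have hsub : ((j + 1 : Nat) : Int) - 1 = (j : Int) := by push_cast; ring
    rw [hsub, PySem.List.pyRange_neg_one_cons (by omega), List.foldl_cons]
    have hj1lt : j + 1 < nums.length := by omega
    have hjlt : j < nums.length := by omega
    have hcast : (j : Int) + 1 = ((j + 1 : Nat) : Int) := by push_cast; ring
    rw [hcast, PySem.List.pyGetD_natCast, PySem.List.pyGetD_natCast, PySem.List.pySetD_natCast,
      pvSmodel_getD nums (j+1) (j+1) hj1lt, if_pos le_rfl]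
    have hval : pvSsum nums (j+1) + nums.getD j 0 = pvSsum nums j := by
      rw [List.getD_eq_getElem _ _ hjlt]
      unfold pvSsum
      rw [List.drop_eq_getElem_cons hjlt, List.sum_cons]
      ring
    rw [hval, pvSmodel_set nums j hj1lt]
    exact ih (by omega)

-- ===== VERDICT (by name: the statement is the Claim_ definition above) =====
theorem compareBitonicSums_spec : Claim_equal_compareBitonicSums := by
  intro nums _ hne
  unfold Spec_compareBitonicSums compareBitonicSums compareBitonicSums_alt
  cases hmax : PySem.List.max? nums (fun y => y) with
  | none => exact absurd ((PySem.List.max?_eq_none_iff _ _).1 hmax) hne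
  | some m =>
    have hm : m ∈ nums := PySem.List.max?_mem hmax
    have hn : 0 < nums.length := List.length_pos_iff.2 hne
    have hjlt : (PySem.List.index? nums.reverse m).getD 0 < nums.length := pvIdx_lt nums m hm
    obtain ⟨p, hp⟩ : ∃ p : Nat,
        nums.length - 1 - (PySem.List.index? nums.reverse m).getD 0 = p := ⟨_, rfl⟩
    have hplt : p < nums.length := by omega
    simp only [PySem.List.len_eq]
    have hpeak : (PySem.List.pyRange 0 (nums.length : Int) 1).foldl
        (fun peak i => if PySem.List.pyGetD nums i 0 = m then i else peak) 0 = (p : Int) := by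
      rw [pvPeak_foldl_eq nums m hm]; omega
    have hpeakB : (nums.length : Int) - 1 - ((PySem.List.index? nums.reverse m).getD 0 : Int)
        = (p : Int) := by omega
    have hpre : (PySem.List.pyRange 1 (nums.length : Int) 1).foldl
        (fun pr i => PySem.List.pySetD pr i
          (PySem.List.pyGetD pr (i - 1) 0 + PySem.List.pyGetD nums i 0))
        (PySem.List.pySetD (List.replicate nums.length 0) 0 (PySem.List.pyGetD nums 0 0))
        = pvPmodel nums (nums.length - 1) := by
      rw [pvPmodel_zero nums hne]
      exact pvPrefix_loop nums nums.length le_rfl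
    have hsufrange : (nums.length : Int) - 2 = ((nums.length - 1 : Nat) : Int) - 1 := by omega
    have hsuf : (PySem.List.pyRange ((nums.length : Int) - 2) (-1) (-1)).foldl
        (fun s i => PySem.List.pySetD s i
          (PySem.List.pyGetD s (i + 1) 0 + PySem.List.pyGetD nums i 0))
        (PySem.List.pySetD (List.replicate nums.length 0) ((nums.length : Int) - 1)
          (PySem.List.pyGetD nums ((nums.length : Int) - 1) 0))
        = pvSmodel nums 0 := by
      rw [pvSmodel_last nums hne, hsufrange]
      exact pvSuffix_loop nums hne (nums.length - 1) le_rfl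
    have hread1 : PySem.List.pyGetD (pvPmodel nums (nums.length - 1)) (p : Int) 0
        = pvPsum nums p := by
      rw [PySem.List.pyGetD_natCast, pvPmodel_getD nums (nums.length - 1) p hplt,
        if_pos (by omega)]
    have hread2 : PySem.List.pyGetD (pvSmodel nums 0) (p : Int) 0 = pvSsum nums p := by
      rw [PySem.List.pyGetD_natCast, pvSmodel_getD nums 0 p hplt, if_pos (by omega)]
    have hslice1 : (PySem.List.slice nums none (some ((p : Int) + 1))).sum = pvPsum nums p := by
      rw [show ((p : Int) + 1) = ((p + 1 : Nat) : Int) by push_cast; ring,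
        PySem.List.slice_to_natCast]
      rfl
    have hslice2 : (PySem.List.slice nums (some (p : Int)) none).sum = pvSsum nums p := by
      rw [PySem.List.slice_from_natCast]
      rfl
    simp only [hpeak, hpeakB, hpre, hsuf, hread1, hread2, hslice1, hslice2]
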